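-- pv_equiv track=rewrite | github.com/fOstroski76/HMMPairwiseAlignment | GeneratePairs.py | clean_alignment
-- ===== SOURCE A (Python) =====
-- def clean_alignment(seq1, seq2):
--     """
--     Cleans a pair of aligned sequences by resolving redundant gaps,
--     misaligned gaps, and ensuring residues align wherever possible,
--     including accounting for complementary base pairs.
--     """
--     # Define complementary base pairs
--     complements = {'A': 'T', 'T': 'A', 'C': 'G', 'G': 'C'}
--
--     # Convert sequences to lists for easier manipulation
--     seq1 = list(seq1)
--     seq2 = list(seq2)
--
--     i = 0
--     while i < len(seq1):
--         # If both positions are gaps, remove the column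
--         if seq1[i] == '-' and seq2[i] == '-':
--             del seq1[i]
--             del seq2[i]
--             continue  # Skip incrementing, as lists have shifted
--
--         # Handle cases of complementary misaligned gaps
--         elif seq1[i] == '-' and seq2[i] in complements and i + 1 < len(seq1) and seq1[i + 1] == complements[seq2[i]]:
--             # Shift the gap in seq1 to the right
--             seq1[i], seq1[i + 1] = seq1[i + 1], seq1[i]
--         elif seq2[i] == '-' and seq1[i] in complements and i + 1 < len(seq2) and seq2[i + 1] == complements[seq1[i]]:
--             # Shift the gap in seq2 to the right
--             seq2[i], seq2[i + 1] = seq2[i + 1], seq2[i]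
--
--         # Remove mismatched gaps with complementary bases
--         elif seq1[i] == '-' and seq2[i] in complements:
--             del seq1[i]
--             del seq2[i]
--             continue
--         elif seq2[i] == '-' and seq1[i] in complements:
--             del seq1[i]
--             del seq2[i]
--             continue
--
--         i += 1  # Move to the next column
--
--     # Join the lists back into strings
--     return ''.join(seq1), ''.join(seq2)
-- ===== SOURCE B (Python) =====
-- def clean_alignment(seq1, seq2):
--     """One forward pass over the aligned columns, writing the cleaned pair
--     into output buffers; a gap shifted rightward is carried into the next
--     column instead of mutating the inputs in place."""
--     complements = {'A': 'T', 'T': 'A', 'C': 'G', 'G': 'C'}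
--     out1, out2 = [], []
--     gap1 = gap2 = False  # a gap carried into the current column
--     for k in range(len(seq1)):
--         a = '-' if gap1 else seq1[k]
--         b = '-' if gap2 else seq2[k]
--         gap1 = gap2 = False
--         if a == '-' and b == '-':
--             continue
--         if a == '-' and b in complements and k + 1 < len(seq1) and seq1[k + 1] == complements[b]:
--             out1.append(complements[b])
--             out2.append(b)
--             gap1 = True
--         elif b == '-' and a in complements and k + 1 < len(seq2) and seq2[k + 1] == complements[a]:
--             out1.append(a)
--             out2.append(complements[a])
--             gap2 = True
--         elif a == '-' and b in complements:
--             continue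
--         elif b == '-' and a in complements:
--             continue
--         else:
--             out1.append(a)
--             out2.append(b)
--     # drain seq2's unpaired remainder; a gap still carried lands first
--     # (a gap carried in seq1 always lands within the paired columns)
--     rest = len(seq1)
--     if gap2:
--         out2.append('-')
--         rest += 1
--     out2.extend(seq2[rest:])
--     return ''.join(out1), ''.join(out2)
-- ===== Notes on version B (the rewrite author's own statement) =====
-- stated objective: alternative
-- what changed: A repeatedly deletes and swaps columns in place in Python lists; B makes one forward pass over the columns, building output buffers and carrying a shifted gap into the next column, then drains seq2's unpaired remainder; Pre_ excludes only the inputs where A raises (len(seq1) > len(seq2), IndexError).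
import Mathlib
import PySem

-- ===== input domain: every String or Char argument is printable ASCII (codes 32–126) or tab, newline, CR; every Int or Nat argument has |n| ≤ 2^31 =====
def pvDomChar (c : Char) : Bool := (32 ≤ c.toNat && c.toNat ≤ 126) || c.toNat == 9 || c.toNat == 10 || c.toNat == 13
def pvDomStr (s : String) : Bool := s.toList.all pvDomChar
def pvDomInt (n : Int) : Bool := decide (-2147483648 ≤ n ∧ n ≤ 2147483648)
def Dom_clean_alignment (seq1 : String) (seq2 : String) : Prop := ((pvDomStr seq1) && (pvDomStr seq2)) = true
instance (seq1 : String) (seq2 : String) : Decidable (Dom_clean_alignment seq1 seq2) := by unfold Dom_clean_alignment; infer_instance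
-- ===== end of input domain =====

-- B replaces A's in-place deletions/swaps on the sequences by a single
-- forward pass building output buffers with a carried gap.

-- ===== PORT A =====
-- the `complements` dict of A, as a partial map
def pvComplA (c : Char) : Option Char :=
  if c = 'A' then some 'T'
  else if c = 'T' then some 'A'
  else if c = 'C' then some 'G'
  else if c = 'G' then some 'C'
  else none

-- A's while loop: in-place deletions (eraseIdx) and adjacent swaps (set), index i.
-- The getD defaults are reached only where Python raises IndexError (excluded by Pre_).
def loopA (i : Nat) (s1 s2 : List Char) : List Char × List Char :=
  if h : i < s1.length then
    let a := s1.getD i ' '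
    let b := s2.getD i ' '
    if a = '-' ∧ b = '-' then
      loopA i (s1.eraseIdx i) (s2.eraseIdx i)
    else if a = '-' ∧ (pvComplA b).isSome ∧ i + 1 < s1.length ∧ s1.getD (i+1) ' ' = (pvComplA b).getD ' ' then
      loopA (i+1) ((s1.set i (s1.getD (i+1) ' ')).set (i+1) '-') s2
    else if b = '-' ∧ (pvComplA a).isSome ∧ i + 1 < s2.length ∧ s2.getD (i+1) ' ' = (pvComplA a).getD ' ' then
      loopA (i+1) s1 ((s2.set i (s2.getD (i+1) ' ')).set (i+1) '-')
    else if a = '-' ∧ (pvComplA b).isSome then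
      loopA i (s1.eraseIdx i) (s2.eraseIdx i)
    else if b = '-' ∧ (pvComplA a).isSome then
      loopA i (s1.eraseIdx i) (s2.eraseIdx i)
    else
      loopA (i+1) s1 s2
  else (s1, s2)
termination_by s1.length - i
decreasing_by all_goals (simp_all [List.length_eraseIdx, List.length_set]; omega)

def clean_alignment (seq1 : String) (seq2 : String) : String × String :=
  let r := loopA 0 seq1.toList seq2.toList
  (String.mk r.1, String.mk r.2)

-- ===== PORT B =====
-- the `complements` dict of B
def pvComplB (c : Char) : Option Char :=
  if c = 'A' then some 'T'
  else if c = 'T' then some 'A'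
  else if c = 'C' then some 'G'
  else if c = 'G' then some 'C'
  else none

-- B's single forward pass over column index k with carried-gap flags gap1/gap2
-- and output accumulators out1/out2; s1, s2 are never mutated.
def loopB (s1 s2 : List Char) (k : Nat) (gap1 gap2 : Bool)
    (out1 out2 : List Char) : List Char × List Char :=
  if h : k < s1.length then
    let a := if gap1 then '-' else s1.getD k ' '
    let b := if gap2 then '-' else s2.getD k ' '
    if a = '-' ∧ b = '-' then
      loopB s1 s2 (k+1) false false out1 out2
    else if a = '-' ∧ (pvComplB b).isSome ∧ k + 1 < s1.length ∧ s1.getD (k+1) ' ' = (pvComplB b).getD ' ' then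
      loopB s1 s2 (k+1) true false (out1 ++ [(pvComplB b).getD ' ']) (out2 ++ [b])
    else if b = '-' ∧ (pvComplB a).isSome ∧ k + 1 < s2.length ∧ s2.getD (k+1) ' ' = (pvComplB a).getD ' ' then
      loopB s1 s2 (k+1) false true (out1 ++ [a]) (out2 ++ [(pvComplB a).getD ' '])
    else if a = '-' ∧ (pvComplB b).isSome then
      loopB s1 s2 (k+1) false false out1 out2
    else if b = '-' ∧ (pvComplB a).isSome then
      loopB s1 s2 (k+1) false false out1 out2
    else
      loopB s1 s2 (k+1) false false (out1 ++ [a]) (out2 ++ [b])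
  else
    -- drain seq2's unpaired remainder; a still-carried gap lands first
    if gap2 then (out1, out2 ++ ('-' :: s2.drop (s1.length + 1)))
    else (out1, out2 ++ s2.drop s1.length)
termination_by s1.length - k

def clean_alignment_alt (seq1 : String) (seq2 : String) : String × String :=
  let r := loopB seq1.toList seq2.toList 0 false false [] []
  (String.mk r.1, String.mk r.2)

-- ===== PRECONDITION & SPEC =====
-- Python A raises IndexError exactly when len(seq1) > len(seq2) (its loop
-- indexes seq2[i] for every i < len(seq1)); Pre_ admits exactly the inputs on
-- which A returns.
def Pre_clean_alignment (seq1 : String) (seq2 : String) : Prop :=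
  seq1.toList.length ≤ seq2.toList.length
instance (seq1 : String) (seq2 : String) : Decidable (Pre_clean_alignment seq1 seq2) := by
  unfold Pre_clean_alignment; infer_instance

def pvWitness_clean_alignment : String × String := ("A-TG-", "-TA-C")

def Spec_clean_alignment (seq1 : String) (seq2 : String) (out : String × String) : Prop :=
  out = clean_alignment_alt seq1 seq2
instance (seq1 : String) (seq2 : String) (out : String × String) : Decidable (Spec_clean_alignment seq1 seq2 out) := by
  unfold Spec_clean_alignment; infer_instance

-- ===== CLAIM (what is proved, stated in full; the proofs are below) =====
def Claim_equal_clean_alignment : Prop := ∀ (seq1 : String) (seq2 : String), Dom_clean_alignment seq1 seq2 → Pre_clean_alignment seq1 seq2 → Spec_clean_alignment seq1 seq2 (clean_alignment seq1 seq2)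

-- ===== LEMMAS AND PROOFS =====

-- common functional form of both loops: structural pass over the two column lists
def pvG : List Char → List Char → List Char × List Char
  | [], s2 => ([], s2)
  | a :: t1, [] => (a :: t1, [])
  | a :: t1, b :: t2 =>
    if a = '-' ∧ b = '-' then pvG t1 t2
    else if h2 : a = '-' ∧ (pvComplA b).isSome ∧ t1.head? = some ((pvComplA b).getD ' ') then
      let r := pvG ('-' :: t1.tail) t2
      ((pvComplA b).getD ' ' :: r.1, b :: r.2)
    else if h3 : b = '-' ∧ (pvComplA a).isSome ∧ t2.head? = some ((pvComplA a).getD ' ') then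
      let r := pvG t1 ('-' :: t2.tail)
      (a :: r.1, (pvComplA a).getD ' ' :: r.2)
    else if a = '-' ∧ (pvComplA b).isSome then pvG t1 t2
    else if b = '-' ∧ (pvComplA a).isSome then pvG t1 t2
    else
      let r := pvG t1 t2
      (a :: r.1, b :: r.2)
termination_by s1 _ => s1.length
decreasing_by
  all_goals simp_all [List.length_tail]
  · rcases t1 with _ | ⟨x, xs⟩ <;> simp_all

theorem loopA_eq_pvG (n : Nat) : ∀ (i : Nat) (s1 s2 : List Char),
    s1.length - i = n → i ≤ s1.length → s1.length ≤ s2.length →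
    loopA i s1 s2 =
      (s1.take i ++ (pvG (s1.drop i) (s2.drop i)).1,
       s2.take i ++ (pvG (s1.drop i) (s2.drop i)).2) := by
  induction n with
  | zero =>
    intro i s1 s2 hn hi hle
    have hi' : i = s1.length := by omega
    rw [loopA]
    have hdrop : s1.drop i = [] := by simp [hi']
    rw [hdrop]
    simp [pvG, hi', List.take_of_length_le (le_refl s1.length), List.take_append_drop]
  | succ m ih =>
    intro i s1 s2 hn hi hle
    have hlt : i < s1.length := by omega
    have hlt2 : i < s2.length := by omega
    have e1 : s1.getD i ' ' = s1[i] := List.getD_eq_getElem s1 ' ' hlt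
    have e2 : s2.getD i ' ' = s2[i] := List.getD_eq_getElem s2 ' ' hlt2
    have hd1 : s1.drop i = s1[i] :: s1.drop (i+1) := List.drop_eq_getElem_cons hlt
    have hd2 : s2.drop i = s2[i] :: s2.drop (i+1) := List.drop_eq_getElem_cons hlt2
    have hh1 : ∀ v : Char, ((s1.drop (i+1)).head? = some v) ↔
        (i + 1 < s1.length ∧ s1.getD (i+1) ' ' = v) := by
      intro v
      rw [List.head?_drop, List.getElem?_eq_some_iff]
      constructor
      · rintro ⟨h, hv⟩; exact ⟨h, by rw [List.getD_eq_getElem _ _ h, hv]⟩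
      · rintro ⟨h, hv⟩; exact ⟨h, by rw [← List.getD_eq_getElem s1 ' ' h, hv]⟩
    have hh2 : ∀ v : Char, ((s2.drop (i+1)).head? = some v) ↔
        (i + 1 < s2.length ∧ s2.getD (i+1) ' ' = v) := by
      intro v
      rw [List.head?_drop, List.getElem?_eq_some_iff]
      constructor
      · rintro ⟨h, hv⟩; exact ⟨h, by rw [List.getD_eq_getElem _ _ h, hv]⟩
      · rintro ⟨h, hv⟩; exact ⟨h, by rw [← List.getD_eq_getElem s2 ' ' h, hv]⟩
    have ltk1 : (s1.take i).length = i := by simp [List.length_take]; omega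
    have ltk2 : (s2.take i).length = i := by simp [List.length_take]; omega
    have tk1s : s1.take (i+1) = s1.take i ++ [s1[i]] := by
      rw [List.take_succ, List.getElem?_eq_getElem hlt]; rfl
    have tk2s : s2.take (i+1) = s2.take i ++ [s2[i]] := by
      rw [List.take_succ, List.getElem?_eq_getElem hlt2]; rfl
    -- take/drop of an erased column
    have ter1 : (s1.eraseIdx i).take i = s1.take i := List.take_eraseIdx_eq_take_of_le s1 i i le_rfl
    have ter2 : (s2.eraseIdx i).take i = s2.take i := List.take_eraseIdx_eq_take_of_le s2 i i le_rfl
    have der1 : (s1.eraseIdx i).drop i = s1.drop (i+1) := by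
      rw [List.eraseIdx_eq_take_drop_succ, List.drop_append]
      rw [List.drop_eq_nil_of_le (by omega : (s1.take i).length ≤ i)]
      simp [ltk1]
    have der2 : (s2.eraseIdx i).drop i = s2.drop (i+1) := by
      rw [List.eraseIdx_eq_take_drop_succ, List.drop_append]
      rw [List.drop_eq_nil_of_le (by omega : (s2.take i).length ≤ i)]
      simp [ltk2]
    have ler1 : (s1.eraseIdx i).length = s1.length - 1 := by
      simp [List.length_eraseIdx, hlt]
    have ler2 : (s2.eraseIdx i).length = s2.length - 1 := by
      simp [List.length_eraseIdx, hlt2]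
    rw [loopA, dif_pos hlt]
    simp only [e1, e2]
    rw [hd1, hd2]
    simp only [pvG, List.tail_drop, hh1, hh2]
    split_ifs with h1 h2 h3 h4 h5
    · -- both gaps: delete the column
      rw [ih i (s1.eraseIdx i) (s2.eraseIdx i) (by omega) (by omega) (by omega),
        ter1, ter2, der1, der2]
    · -- shift the gap in s1 to the right
      obtain ⟨ha, hs, hi1, hv⟩ := h2
      have htk : ((s1.set i (s1.getD (i+1) ' ')).set (i+1) '-').take (i+1)
          = s1.take i ++ [s1.getD (i+1) ' '] := by
        rw [List.take_set, List.set_eq_of_length_le (by simp [List.length_take]),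
          List.take_set, tk1s, List.set_append, if_neg (by rw [ltk1]; omega), ltk1,
          Nat.sub_self]
        rfl
      have hdr : ((s1.set i (s1.getD (i+1) ' ')).set (i+1) '-').drop (i+1)
          = '-' :: s1.drop (i+2) := by
        rw [List.drop_eq_getElem_cons (by simp [List.length_set]; omega)]
        congr 1
        · exact List.getElem_set_self _
        · rw [List.drop_set_of_lt (by omega), List.drop_set_of_lt (by omega)]
      have hln : ((s1.set i (s1.getD (i+1) ' ')).set (i+1) '-').length = s1.length := by
        simp [List.length_set]
      rw [ih (i+1) _ s2 (by rw [hln]; omega) (by rw [hln]; omega) (by rw [hln]; omega),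
        htk, hdr, tk2s, hv, List.append_assoc, List.append_assoc]
      have e12 : i + 1 + 1 = i + 2 := by omega
      rw [e12]
      rfl
    · -- shift the gap in s2 to the right
      obtain ⟨hb, hs, hi1, hv⟩ := h3
      have htk : ((s2.set i (s2.getD (i+1) ' ')).set (i+1) '-').take (i+1)
          = s2.take i ++ [s2.getD (i+1) ' '] := by
        rw [List.take_set, List.set_eq_of_length_le (by simp [List.length_take]),
          List.take_set, tk2s, List.set_append, if_neg (by rw [ltk2]; omega), ltk2,
          Nat.sub_self]
        rfl
      have hdr : ((s2.set i (s2.getD (i+1) ' ')).set (i+1) '-').drop (i+1)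
          = '-' :: s2.drop (i+2) := by
        rw [List.drop_eq_getElem_cons (by simp [List.length_set]; omega)]
        congr 1
        · exact List.getElem_set_self _
        · rw [List.drop_set_of_lt (by omega), List.drop_set_of_lt (by omega)]
      have hln : ((s2.set i (s2.getD (i+1) ' ')).set (i+1) '-').length = s2.length := by
        simp [List.length_set]
      rw [ih (i+1) s1 _ (by omega) (by omega) (by rw [hln]; omega),
        htk, hdr, tk1s, hv, List.append_assoc, List.append_assoc]
      have e12 : i + 1 + 1 = i + 2 := by omega
      rw [e12]
      rfl
    · -- gap in s1 vs complementary base: delete the column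
      rw [ih i (s1.eraseIdx i) (s2.eraseIdx i) (by omega) (by omega) (by omega),
        ter1, ter2, der1, der2]
    · -- gap in s2 vs complementary base: delete the column
      rw [ih i (s1.eraseIdx i) (s2.eraseIdx i) (by omega) (by omega) (by omega),
        ter1, ter2, der1, der2]
    · -- keep the column
      rw [ih (i+1) s1 s2 (by omega) (by omega) hle, tk1s, tk2s,
        List.append_assoc, List.append_assoc]
      rfl

theorem pvComplB_eq_pvComplA : pvComplB = pvComplA := rfl

-- the carried-gap flag of B as a list transformer (proof helper)
def pvCarry (g : Bool) (l : List Char) : List Char :=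
  if g then '-' :: l.tail else l

theorem loopB_eq_pvG (n : Nat) : ∀ (k : Nat) (s1 s2 : List Char) (g1 g2 : Bool)
    (out1 out2 : List Char),
    s1.length - k = n → k ≤ s1.length → s1.length ≤ s2.length →
    (g1 = true → k < s1.length) →
    (g2 = true → k < s2.length) →
    loopB s1 s2 k g1 g2 out1 out2 =
      (out1 ++ (pvG (pvCarry g1 (s1.drop k)) (pvCarry g2 (s2.drop k))).1,
       out2 ++ (pvG (pvCarry g1 (s1.drop k)) (pvCarry g2 (s2.drop k))).2) := by
  induction n with
  | zero =>
    intro k s1 s2 g1 g2 out1 out2 hn hk hle hg1 hg2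
    have hk' : k = s1.length := by omega
    have hg1' : g1 = false := by
      cases g1
      · rfl
      · exact absurd (hg1 rfl) (by omega)
    subst hg1'
    rw [loopB.eq_def, dif_neg (by omega)]
    have hd1 : s1.drop k = [] := by simp [hk']
    cases g2 with
    | false =>
      simp [pvG, pvCarry, hd1, hk']
    | true =>
      have hk2 : k < s2.length := hg2 rfl
      simp only [pvCarry, hd1, if_true, List.tail_drop]
      simp [pvG, hk']
  | succ m ih =>
    intro k s1 s2 g1 g2 out1 out2 hn hk hle hg1 hg2
    have hlt : k < s1.length := by omega
    have hlt2 : k < s2.length := by omega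
    have e1 : s1.getD k ' ' = s1[k] := List.getD_eq_getElem s1 ' ' hlt
    have e2 : s2.getD k ' ' = s2[k] := List.getD_eq_getElem s2 ' ' hlt2
    have hd1 : s1.drop k = s1[k] :: s1.drop (k+1) := List.drop_eq_getElem_cons hlt
    have hd2 : s2.drop k = s2[k] :: s2.drop (k+1) := List.drop_eq_getElem_cons hlt2
    have hh1 : ∀ v : Char, ((s1.drop (k+1)).head? = some v) ↔
        (k + 1 < s1.length ∧ s1.getD (k+1) ' ' = v) := by
      intro v
      rw [List.head?_drop, List.getElem?_eq_some_iff]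
      constructor
      · rintro ⟨h, hv⟩; exact ⟨h, by rw [List.getD_eq_getElem _ _ h, hv]⟩
      · rintro ⟨h, hv⟩; exact ⟨h, by rw [← List.getD_eq_getElem s1 ' ' h, hv]⟩
    have hh2 : ∀ v : Char, ((s2.drop (k+1)).head? = some v) ↔
        (k + 1 < s2.length ∧ s2.getD (k+1) ' ' = v) := by
      intro v
      rw [List.head?_drop, List.getElem?_eq_some_iff]
      constructor
      · rintro ⟨h, hv⟩; exact ⟨h, by rw [List.getD_eq_getElem _ _ h, hv]⟩
      · rintro ⟨h, hv⟩; exact ⟨h, by rw [← List.getD_eq_getElem s2 ' ' h, hv]⟩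
    cases g1 <;> cases g2 <;>
        rw [loopB.eq_def, dif_pos hlt] <;>
        simp only [pvCarry, if_true, if_false, Bool.false_eq_true, e1, e2, hd1, hd2,
          List.tail_cons, List.tail_drop, pvComplB_eq_pvComplA] <;>
        simp only [pvG, List.tail_drop, hh1, hh2] <;>
        split_ifs with h1 h2 h3 h4 h5 <;>
      first
        | (rw [ih (k+1) s1 s2 false false _ _ (by omega) (by omega) hle
              (by simp) (by simp)]
           simp [pvCarry, List.tail_drop, List.append_assoc])
        | (rw [ih (k+1) s1 s2 true false _ _ (by omega) (by omega) hle
              (fun _ => h2.2.2.1) (by simp)]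
           simp [pvCarry, List.tail_drop, List.append_assoc])
        | (rw [ih (k+1) s1 s2 false true _ _ (by omega) (by omega) hle
              (by simp) (fun _ => h3.2.2.1)]
           simp [pvCarry, List.tail_drop, List.append_assoc])

-- ===== VERDICT (by name: the statement is the Claim_ definition above) =====
theorem clean_alignment_spec : Claim_equal_clean_alignment := by
  intro seq1 seq2 _ hpre
  unfold Spec_clean_alignment clean_alignment clean_alignment_alt
  have hA := loopA_eq_pvG (seq1.toList.length) 0 seq1.toList seq2.toList rfl (Nat.zero_le _) hpre
  have hB := loopB_eq_pvG (seq1.toList.length) 0 seq1.toList seq2.toList false false [] [] rfl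
      (Nat.zero_le _) hpre (by simp) (by simp)
  simp only [pvCarry, List.take_zero, List.drop_zero, List.nil_append, if_neg] at hA hB
  simp [hA, hB]
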